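-- pv_equiv track=rewrite | github.com/iownthegame/AdventofCode2019 | day4/sol.py | part1
-- ===== SOURCE A (Python) =====
-- import collections
--
-- def part1(start, end):
--     cnt = 0
--     for num in range(start, end+1):
--         string = str(num)
--         nums = [int(s) for s in string]
--         counter = collections.Counter(string)
--         if not any([val > 1 for val in counter.values()]):
--             continue
--         diff = [x - y for x, y in zip(nums[1:], nums)]
--         if any([d < 0 for d in diff]):
--             continue
--         cnt += 1
--     return cnt
-- ===== SOURCE B (Python) =====
-- def _valid(num):
--     # nondecreasing digits (scanned right-to-left) with at least one adjacent repeat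
--     n = num
--     prev = 10
--     rep = False
--     while n > 0:
--         n, d = divmod(n, 10)
--         if d > prev:
--             return False
--         rep = rep or d == prev
--         prev = d
--     return rep
--
-- def part1(start, end):
--     cnt = 0
--     for num in range(start, end + 1):
--         if _valid(num):
--             cnt += 1
--     return cnt
-- ===== Notes on version B (the rewrite author's own statement) =====
-- stated objective: faster
-- what changed: B drops the string/Counter/zip machinery entirely: each number is checked by a single right-to-left arithmetic divmod scan that bails out at the first decreasing digit and tracks a repeat flag on the fly, instead of building str(num), a digit list, a Counter and a pairwise-difference list per number.
import Mathlib
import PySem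

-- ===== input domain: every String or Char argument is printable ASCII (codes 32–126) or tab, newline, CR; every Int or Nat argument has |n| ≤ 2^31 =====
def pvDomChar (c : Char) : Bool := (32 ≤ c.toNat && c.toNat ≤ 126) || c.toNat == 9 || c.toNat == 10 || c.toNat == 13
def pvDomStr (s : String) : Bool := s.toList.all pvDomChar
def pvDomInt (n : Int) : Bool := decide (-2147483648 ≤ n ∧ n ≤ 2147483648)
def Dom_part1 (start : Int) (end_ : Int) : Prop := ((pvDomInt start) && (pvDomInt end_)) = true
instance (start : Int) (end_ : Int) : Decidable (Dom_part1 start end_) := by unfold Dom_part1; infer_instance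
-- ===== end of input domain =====

-- B replaces A's per-number string/Counter/zip-of-differences machinery by a single right-to-left
-- arithmetic divmod scan with early exit (objective: faster, constant-factor).

-- ===== PORT A =====
def part1 (start : Int) (end_ : Int) : Int :=
  (PySem.List.pyRange start (end_ + 1) 1).foldl
    (fun cnt num =>
      let string := PySem.Int.toStr num
      -- int(s) on a one-character string; exact on digit characters (Pre_part1 excludes
      -- ranges containing negatives, where Python's int('-') raises ValueError)
      let nums := string.toList.map (fun s => (PySem.Int.ofChars? [s]).getD 0)
      let counter := PySem.Dict.counter string.toList
      if !(counter.values.any (fun val => decide (val > 1))) then cnt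
      else
        let diff := ((PySem.List.slice nums (some 1) none).zip nums).map (fun p => p.1 - p.2)
        if diff.any (fun d => decide (d < 0)) then cnt
        else cnt + 1) 0

-- ===== PORT B =====
-- the 'while n > 0' scan of _valid; the Nat fuel only makes the recursion structural
-- (n.toNat steps always suffice, since n strictly shrinks under //10)
def pyValidGo : Nat → Int → Int → Bool → Bool
  | 0, _, _, rep => rep
  | fuel + 1, n, prev, rep =>
    if 0 < n then
      let d := PySem.Int.mod n 10
      if d > prev then false
      else pyValidGo fuel (PySem.Int.floordiv n 10) d (rep || (d == prev))
    else rep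

def pyValid (n : Int) (prev : Int) (rep : Bool) : Bool := pyValidGo n.toNat n prev rep

def part1_alt (start : Int) (end_ : Int) : Int :=
  (PySem.List.pyRange start (end_ + 1) 1).foldl
    (fun cnt num => if pyValid num 10 false then cnt + 1 else cnt) 0

-- ===== PRECONDITION & SPEC =====
-- A raises ValueError (int('-')) as soon as the range contains a negative number;
-- Pre_part1 excludes exactly the ranges that contain one.
def Pre_part1 (start : Int) (end_ : Int) : Prop := 0 ≤ start ∨ end_ < start
instance (start : Int) (end_ : Int) : Decidable (Pre_part1 start end_) := by unfold Pre_part1; infer_instance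

def pvWitness_part1 : Int × Int := (100, 140)

def Spec_part1 (start : Int) (end_ : Int) (out : Int) : Prop := out = part1_alt start end_
instance (start : Int) (end_ : Int) (out : Int) : Decidable (Spec_part1 start end_ out) := by unfold Spec_part1; infer_instance

-- ===== CLAIM (what is proved, stated in full; the proofs are below) =====
def Claim_equal_part1 : Prop := ∀ (start : Int) (end_ : Int), Dom_part1 start end_ → Pre_part1 start end_ → Spec_part1 start end_ (part1 start end_)

-- ===== LEMMAS AND PROOFS =====

-- chainB R l: every adjacent pair of l satisfies R
def chainB (R : Int → Int → Prop) [DecidableRel R] : List Int → Bool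
  | [] => true
  | [_] => true
  | a :: b :: t => decide (R a b) && chainB R (b :: t)

-- hasAdj l: some adjacent pair of l is equal
def hasAdj : List Int → Bool
  | [] => false
  | [_] => false
  | a :: b :: t => (a == b) || hasAdj (b :: t)

-- monoB/eqB: the two accumulators of pyValid, as recursions over the digit list
def monoB : Int → List Int → Bool
  | _, [] => true
  | p, d :: t => decide (d ≤ p) && monoB d t

def eqB : Int → List Int → Bool
  | _, [] => false
  | p, d :: t => (d == p) || eqB d t

-- chkL: pyValid with the (little-endian) digits already extracted
def chkL : List Int → Int → Bool → Bool
  | [], _, rep => rep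
  | d :: t, p, rep => if p < d then false else chkL t d (rep || (d == p))

lemma pyValidGo_eq : ∀ (f m : Nat) (p : Int) (rep : Bool), m ≤ f →
    pyValidGo f (m : Int) p rep = chkL ((Nat.digits 10 m).map (fun d : Nat => (d : Int))) p rep := by
  intro f
  induction f with
  | zero =>
    intro m p rep hm
    interval_cases m
    simp [pyValidGo, chkL]
  | succ f ih =>
    intro m p rep hm
    rcases Nat.eq_zero_or_pos m with rfl | hpos
    · simp [pyValidGo, chkL]
    · have hlt : (0 : Int) < (m : Int) := by exact_mod_cast hpos
      have hmod : PySem.Int.mod (m : Int) 10 = ((m % 10 : Nat) : Int) := by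
        exact_mod_cast PySem.Int.mod_natCast m 10
      have hdiv : PySem.Int.floordiv (m : Int) 10 = ((m / 10 : Nat) : Int) := by
        exact_mod_cast PySem.Int.floordiv_natCast m 10
      simp only [pyValidGo, gt_iff_lt]
      rw [if_pos hlt, hmod, hdiv]
      rw [Nat.digits_def' (by norm_num : (1:ℕ) < 10) hpos, List.map_cons]
      rw [show chkL (((m % 10 : Nat) : Int) :: (Nat.digits 10 (m / 10)).map (fun d : Nat => (d : Int))) p rep
            = (if p < ((m % 10 : Nat) : Int) then false
               else chkL ((Nat.digits 10 (m / 10)).map (fun d : Nat => (d : Int)))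
                 ((m % 10 : Nat) : Int) (rep || (((m % 10 : Nat) : Int) == p))) from rfl]
      by_cases hc : p < ((m % 10 : Nat) : Int)
      · rw [if_pos hc, if_pos hc]
      · rw [if_neg hc, if_neg hc, ih (m / 10) _ _ (by omega)]

lemma pyValid_eq_chkL (m : Nat) (p : Int) (rep : Bool) :
    pyValid (m : Int) p rep = chkL ((Nat.digits 10 m).map (fun d : Nat => (d : Int))) p rep := by
  have h := pyValidGo_eq m m p rep le_rfl
  simpa [pyValid] using h

lemma chkL_eq : ∀ (r : List Int) (p : Int) (rep : Bool),
    chkL r p rep = (monoB p r && (rep || eqB p r)) := by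
  intro r
  induction r with
  | nil => intro p rep; simp [chkL, monoB, eqB]
  | cons d t ih =>
    intro p rep
    by_cases h : p < d
    · simp [chkL, monoB, eqB, h, not_le.mpr h]
    · have hle : d ≤ p := not_lt.mp h
      simp only [chkL, if_neg h, ih, monoB, eqB, hle, decide_true, Bool.true_and]
      cases rep <;> cases hdp : (d == p) <;> simp

lemma monoB_cons_eq_chain : ∀ (t : List Int) (d : Int),
    monoB d t = chainB (fun a b => b ≤ a) (d :: t) := by
  intro t
  induction t with
  | nil => intro d; simp [monoB, chainB]
  | cons e t ih => intro d; simp [monoB, chainB, ih]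

lemma eqB_cons_eq_hasAdj : ∀ (t : List Int) (d : Int), eqB d t = hasAdj (d :: t) := by
  intro t
  induction t with
  | nil => intro d; simp [eqB, hasAdj]
  | cons e t ih =>
    intro d
    have hcomm : (e == d) = (d == e) := by simp [Bool.beq_comm]
    simp [eqB, hasAdj, ih, hcomm]

lemma monoB_top (r : List Int) (h : ∀ d ∈ r, d < 10) :
    monoB 10 r = chainB (fun a b => b ≤ a) r := by
  cases r with
  | nil => simp [monoB, chainB]
  | cons d t =>
    have hd : d ≤ 10 := le_of_lt (h d (List.mem_cons_self ..))
    simp only [monoB, hd, decide_true, Bool.true_and]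
    exact monoB_cons_eq_chain t d

lemma eqB_top (r : List Int) (h : ∀ d ∈ r, d < 10) : eqB 10 r = hasAdj r := by
  cases r with
  | nil => simp [eqB, hasAdj]
  | cons d t =>
    have hd : (d == (10:Int)) = false := by
      have := h d (List.mem_cons_self ..)
      simp only [beq_eq_false_iff_ne, ne_eq]
      omega
    simp only [eqB, hd, Bool.false_or]
    exact eqB_cons_eq_hasAdj t d

lemma chainB_eq_pairwise (R : Int → Int → Prop) [DecidableRel R]
    (htrans : ∀ a b c, R a b → R b c → R a c) :
    ∀ l : List Int, chainB R l = decide (l.Pairwise R) := by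
  intro l
  induction l with
  | nil => simp [chainB]
  | cons a t ih =>
    cases t with
    | nil => simp [chainB]
    | cons b t =>
      rw [show chainB R (a :: b :: t) = (decide (R a b) && chainB R (b :: t)) from rfl, ih,
        ← Bool.decide_and]
      apply decide_eq_decide.mpr
      constructor
      · rintro ⟨hab, hp⟩
        refine List.pairwise_cons.mpr ⟨?_, hp⟩
        intro x hx
        rcases List.mem_cons.mp hx with rfl | hx'
        · exact hab
        · exact htrans a b x hab ((List.pairwise_cons.mp hp).1 x hx')
      · intro h
        obtain ⟨hf, hp⟩ := List.pairwise_cons.mp h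
        exact ⟨hf b (List.mem_cons_self ..), hp⟩

lemma hasAdj_eq_not_nodup (R : Int → Int → Prop)
    (hanti : ∀ a b, R a b → R b a → a = b) :
    ∀ l : List Int, l.Pairwise R → hasAdj l = !decide l.Nodup := by
  intro l
  induction l with
  | nil => intro _; simp [hasAdj]
  | cons a t ih =>
    intro hpw
    cases t with
    | nil => simp [hasAdj]
    | cons b t =>
      have hab : R a b := (List.pairwise_cons.mp hpw).1 b (List.mem_cons_self ..)
      have hpt : (b :: t).Pairwise R := (List.pairwise_cons.mp hpw).2
      by_cases hc : a = b
      · subst hc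
        simp [hasAdj, List.nodup_cons]
      · have hnot : a ∉ b :: t := by
          intro hmem
          rcases List.mem_cons.mp hmem with rfl | hmem'
          · exact hc rfl
          · exact hc (hanti a b hab ((List.pairwise_cons.mp hpt).1 a hmem'))
        have hne : ((a == b) : Bool) = false := by simp [hc]
        simp [hasAdj, hne, ih hpt, List.nodup_cons, hnot]

lemma toDigitsCore_eq : ∀ (f n : Nat) (l : List Char), 0 < n → n ≤ f →
    Nat.toDigitsCore 10 f n l = ((Nat.digits 10 n).map Nat.digitChar).reverse ++ l := by
  intro f
  induction f with
  | zero => intro n l h1 h2; omega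
  | succ f ih =>
    intro n l h1 h2
    rw [Nat.digits_def' (by norm_num : (1:ℕ) < 10) h1]
    by_cases hz : n / 10 = 0
    · simp [Nat.toDigitsCore, hz]
    · have h1' : 0 < n / 10 := Nat.pos_of_ne_zero hz
      have hstep : Nat.toDigitsCore 10 (f + 1) n l
          = Nat.toDigitsCore 10 f (n / 10) (Nat.digitChar (n % 10) :: l) := by
        simp [Nat.toDigitsCore, hz]
      rw [hstep, ih (n / 10) _ h1' (by omega),
        Nat.digits_def' (by norm_num : (1:ℕ) < 10) h1']
      simp

lemma toDigits_eq (m : Nat) (hm : 0 < m) :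
    Nat.toDigits 10 m = ((Nat.digits 10 m).map Nat.digitChar).reverse := by
  have h := toDigitsCore_eq (m + 1) m [] hm (by omega)
  simpa [Nat.toDigits] using h

lemma digitChar_inj : ∀ a < 10, ∀ b < 10, Nat.digitChar a = Nat.digitChar b → a = b := by decide

lemma val_digitChar : ∀ d < 10, (PySem.Int.ofChars? [Nat.digitChar d]).getD 0 = (d : Int) := by decide

-- A's duplicate test computes ¬Nodup of the character list
lemma counter_any_eq_not_nodup (cs : List Char) :
    ((PySem.Dict.counter cs).values.any (fun val => decide (val > (1 : Int)))) = !decide cs.Nodup := by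
  have hv : (PySem.Dict.counter cs).values = ((PySem.Dict.counter cs).items).map (fun p => p.2) := rfl
  rw [hv, PySem.Dict.items_counter, List.map_map, List.any_map]
  by_cases hnd : cs.Nodup
  · have h1 := List.nodup_iff_count_le_one.mp hnd
    simp only [hnd, decide_true, Bool.not_true, List.any_eq_false]
    intro k _
    have := h1 k
    simp only [Function.comp_apply, decide_eq_true_eq]
    omega
  · simp only [hnd, decide_false, Bool.not_false, List.any_eq_true]
    rw [List.nodup_iff_count_le_one] at hnd
    push Not at hnd
    obtain ⟨k, hk⟩ := hnd
    refine ⟨k, (PySem.Set.mem_ofList _ _).mpr (List.count_pos_iff.mp (by omega)), ?_⟩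
    simp only [Function.comp_apply, decide_eq_true_eq]
    omega

-- A's difference test computes ¬(nondecreasing)
lemma diff_any_aux : ∀ (nums : List Int),
    (((nums.tail.zip nums).map (fun p => p.1 - p.2)).any (fun d => decide (d < 0)))
      = !chainB (fun a b => a ≤ b) nums := by
  intro nums
  induction nums with
  | nil => simp [chainB]
  | cons a t ih =>
    cases t with
    | nil => simp [chainB]
    | cons b t =>
      simp only [List.tail_cons] at ih ⊢
      rw [show (b :: t).zip (a :: b :: t) = (b, a) :: (t.zip (b :: t)) from rfl]
      simp only [List.map_cons, List.any_cons, ih,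
        show chainB (fun a b => a ≤ b) (a :: b :: t)
          = (decide (a ≤ b) && chainB (fun a b => a ≤ b) (b :: t)) from rfl]
      by_cases hab : a ≤ b
      · simp [hab, show ¬ (b - a < 0) by omega]
      · simp [hab, show b - a < 0 by omega]

lemma diff_any_eq (nums : List Int) :
    ((((PySem.List.slice nums (some 1) none).zip nums).map (fun p => p.1 - p.2)).any
      (fun d => decide (d < 0))) = !chainB (fun a b => a ≤ b) nums := by
  rw [PySem.List.slice_from_one]
  exact diff_any_aux nums

lemma if_shape (c1 c2 : Bool) (cnt : Int) :
    (if !c1 then cnt else if c2 then cnt else cnt + 1) = (if c1 && !c2 then cnt + 1 else cnt) := by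
  cases c1 <;> cases c2 <;> simp

-- the per-number condition of A's loop body equals pyValid, for a nonnegative number
lemma cond_eq (m : Nat) :
    (((PySem.Dict.counter (PySem.Int.toStr (m : Int)).toList).values.any (fun val => decide (val > 1))) &&
      !((((PySem.List.slice ((PySem.Int.toStr (m : Int)).toList.map (fun s => (PySem.Int.ofChars? [s]).getD 0)) (some 1) none).zip
            ((PySem.Int.toStr (m : Int)).toList.map (fun s => (PySem.Int.ofChars? [s]).getD 0))).map (fun p => p.1 - p.2)).any
          (fun d => decide (d < 0))))
      = pyValid (m : Int) 10 false := by
  rcases Nat.eq_zero_or_pos m with rfl | hm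
  · decide
  · have hnn : ¬ ((m : Int) < 0) := by omega
    have hcs : (PySem.Int.toStr (m : Int)).toList = ((Nat.digits 10 m).map Nat.digitChar).reverse := by
      rw [PySem.Int.toList_toStr]
      simp only [PySem.Int.toChars, if_neg hnn, Int.toNat_natCast]
      exact toDigits_eq m hm
    have hlt : ∀ d ∈ Nat.digits 10 m, d < 10 := fun d hd => Nat.digits_lt_base (by norm_num) hd
    have hnums : (PySem.Int.toStr (m : Int)).toList.map (fun s => (PySem.Int.ofChars? [s]).getD 0)
        = ((Nat.digits 10 m).map (fun d : Nat => (d : Int))).reverse := by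
      rw [hcs, List.map_reverse, List.map_map]
      congr 1
      refine List.map_congr_left fun d hd => ?_
      simp only [Function.comp_apply]
      exact val_digitChar d (hlt d hd)
    have hltI : ∀ d ∈ (Nat.digits 10 m).map (fun d : Nat => (d : Int)), d < 10 := by
      intro d hd
      rcases List.mem_map.mp hd with ⟨x, hx, rfl⟩
      exact_mod_cast hlt x hx
    have hnodup : (PySem.Int.toStr (m : Int)).toList.Nodup
        ↔ ((Nat.digits 10 m).map (fun d : Nat => (d : Int))).Nodup := by
      rw [hcs, List.nodup_reverse,
        List.nodup_map_iff (fun a b h => Nat.cast_injective h : Function.Injective (fun d : Nat => (d : Int)))]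
      constructor
      · exact fun h => List.Nodup.of_map _ h
      · exact fun h => List.Nodup.map_on
          (fun x hx y hy hxy => digitChar_inj x (hlt x hx) y (hlt y hy) hxy) h
    have hnd2 : decide ((PySem.Int.toStr (m : Int)).toList.Nodup)
        = decide (((Nat.digits 10 m).map (fun d : Nat => (d : Int))).Nodup) :=
      decide_eq_decide.mpr hnodup
    rw [counter_any_eq_not_nodup, hnums, diff_any_eq, pyValid_eq_chkL, chkL_eq,
      monoB_top _ hltI, eqB_top _ hltI, Bool.false_or, hnd2]
    have hchain : chainB (fun a b => a ≤ b) ((Nat.digits 10 m).map (fun d : Nat => (d : Int))).reverse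
        = chainB (fun a b => b ≤ a) ((Nat.digits 10 m).map (fun d : Nat => (d : Int))) := by
      rw [chainB_eq_pairwise (fun a b => a ≤ b) (fun a b c h1 h2 => le_trans h1 h2),
        chainB_eq_pairwise (fun a b => b ≤ a) (fun a b c h1 h2 => le_trans h2 h1)]
      exact decide_eq_decide.mpr List.pairwise_reverse
    rw [hchain]
    by_cases hch : chainB (fun a b => b ≤ a) ((Nat.digits 10 m).map (fun d : Nat => (d : Int))) = true
    · have hpw : ((Nat.digits 10 m).map (fun d : Nat => (d : Int))).Pairwise (fun a b => b ≤ a) := by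
        rw [chainB_eq_pairwise (fun a b => b ≤ a) (fun a b c h1 h2 => le_trans h2 h1)] at hch
        exact of_decide_eq_true hch
      rw [hch, hasAdj_eq_not_nodup (fun a b => b ≤ a) (fun a b h1 h2 => le_antisymm h2 h1) _ hpw]
      simp
    · rw [eq_false_of_ne_true hch]
      simp

-- ===== VERDICT (by name: the statement is the Claim_ definition above) =====
theorem part1_spec : Claim_equal_part1 := by
  intro start end_ _ hpre
  show part1 start end_ = part1_alt start end_
  unfold part1 part1_alt
  apply PySem.List.foldl_congr_mem
  intro acc x hx
  have hx' : start ≤ x ∧ x < end_ + 1 := (PySem.List.mem_pyRange_one).mp hx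
  have hx0 : 0 ≤ x := by rcases hpre with h | h <;> omega
  obtain ⟨m, rfl⟩ : ∃ m : Nat, x = (m : Int) := ⟨x.toNat, (Int.toNat_of_nonneg hx0).symm⟩
  dsimp only
  rw [if_shape, cond_eq]
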